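-- pv_equiv track=rewrite | github.com/emirkacar/PythonileYapilanTemelAlgoritmalar | PYTHON_TEMEL_PROJECTS/IcIceFonksiyonlar.py | hesaplamalar
-- ===== SOURCE A (Python) =====
-- def hesaplamalar(sayi):
--
--     def kareAl(x):
--         return x**2
--
--
--
--     def faktoriyel(x):
--
--         sonuc = 1
--         while(x > 0):
--             sonuc *= x
--             x -= 1
--         return sonuc
--
--     karesi = kareAl(sayi)
--     fakt = faktoriyel(sayi)
--
--     return (f"Karesi = {karesi} faktoriyeli = {fakt}")
-- ===== SOURCE B (Python) =====
-- def hesaplamalar(sayi):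
--     # factorial via divide-and-conquer product of [lo, hi] (binary splitting)
--     def carpim(lo, hi):
--         if lo > hi:
--             return 1
--         if lo == hi:
--             return lo
--         mid = (lo + hi) // 2
--         return carpim(lo, mid) * carpim(mid + 1, hi)
--
--     return f"Karesi = {sayi**2} faktoriyeli = {carpim(1, sayi)}"
-- ===== Notes on version B (the rewrite author's own statement) =====
-- stated objective: alternative
-- what changed: Replaces the accumulator while-loop factorial with a divide-and-conquer binary-splitting product over [1, n] (and inlines the square), a different recursion structure with balanced subproducts.
import Mathlib
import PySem

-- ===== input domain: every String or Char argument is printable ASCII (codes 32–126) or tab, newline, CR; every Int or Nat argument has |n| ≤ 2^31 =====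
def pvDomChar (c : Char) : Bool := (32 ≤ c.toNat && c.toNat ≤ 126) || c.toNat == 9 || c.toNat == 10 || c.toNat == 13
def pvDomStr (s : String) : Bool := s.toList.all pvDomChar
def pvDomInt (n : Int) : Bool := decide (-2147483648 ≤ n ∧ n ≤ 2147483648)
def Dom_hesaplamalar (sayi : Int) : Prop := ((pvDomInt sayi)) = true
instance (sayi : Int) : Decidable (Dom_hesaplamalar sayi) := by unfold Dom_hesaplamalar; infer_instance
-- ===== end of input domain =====

-- B replaces A's accumulator while-loop factorial with a divide-and-conquer
-- binary-splitting product over [1, n]; same return value (objective: alternative).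

-- ===== PORT A =====
-- the inner while-loop of faktoriyel: state (x, sonuc)
def pvFaktLoop (x sonuc : Int) : Int :=
  if _h : x > 0 then pvFaktLoop (x - 1) (sonuc * x) else sonuc
termination_by x.toNat
decreasing_by omega

def hesaplamalar (sayi : Int) : String :=
  let karesi := sayi ^ 2
  let fakt := pvFaktLoop sayi 1
  "Karesi = " ++ PySem.Int.toStr karesi ++ " faktoriyeli = " ++ PySem.Int.toStr fakt

-- ===== PORT B =====
-- product of the integers in [lo, hi] by binary splitting (Source B's carpim)
def pvCarpim (lo hi : Int) : Int :=
  if _h1 : lo > hi then 1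
  else if _h2 : lo = hi then lo
  else
    let mid := PySem.Int.floordiv (lo + hi) 2
    pvCarpim lo mid * pvCarpim (mid + 1) hi
termination_by (hi - lo).toNat
decreasing_by
  · have := PySem.Int.floordiv_two_mid_bounds (lo := lo) (hi := hi) (by omega)
    have hlt : PySem.Int.floordiv (lo + hi) 2 < hi :=
      (PySem.Int.floordiv_lt_iff_lt_mul (by omega)).mpr (by omega)
    omega
  · have := PySem.Int.floordiv_two_mid_bounds (lo := lo) (hi := hi) (by omega)
    omega

def hesaplamalar_alt (sayi : Int) : String :=
  "Karesi = " ++ PySem.Int.toStr (sayi ^ 2) ++ " faktoriyeli = " ++ PySem.Int.toStr (pvCarpim 1 sayi)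

-- ===== PRECONDITION & SPEC =====
def Spec_hesaplamalar (sayi : Int) (out : String) : Prop := out = hesaplamalar_alt sayi
instance (sayi : Int) (out : String) : Decidable (Spec_hesaplamalar sayi out) := by unfold Spec_hesaplamalar; infer_instance

-- ===== CLAIM (what is proved, stated in full; the proofs are below) =====
def Claim_equal_hesaplamalar : Prop := ∀ (sayi : Int), Dom_hesaplamalar sayi → Spec_hesaplamalar sayi (hesaplamalar sayi)

-- ===== LEMMAS AND PROOFS =====

-- proof-side factorial spec: F x = x * (x-1) * … * 1, 1 for x ≤ 0
def pvF (x : Int) : Int :=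
  if _h : x ≤ 0 then 1 else x * pvF (x - 1)
termination_by x.toNat
decreasing_by omega

theorem pvF_of_le {x : Int} (h : x ≤ 0) : pvF x = 1 := by
  rw [pvF]; rw [dif_pos h]

theorem pvF_of_gt {x : Int} (h : 0 < x) : pvF x = x * pvF (x - 1) := by
  rw [pvF]; rw [dif_neg (by omega)]

theorem pvCarpim_of_gt {lo hi : Int} (h : lo > hi) : pvCarpim lo hi = 1 := by
  rw [pvCarpim]; rw [dif_pos h]

theorem pvCarpim_self (lo : Int) : pvCarpim lo lo = lo := by
  rw [pvCarpim]; rw [dif_neg (by omega)]; rw [dif_pos rfl]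

theorem pvCarpim_of_lt {lo hi : Int} (h : lo < hi) :
    pvCarpim lo hi =
      pvCarpim lo (PySem.Int.floordiv (lo + hi) 2) *
        pvCarpim (PySem.Int.floordiv (lo + hi) 2 + 1) hi := by
  rw [pvCarpim]; rw [dif_neg (by omega)]; rw [dif_neg (by omega)]

theorem pvFaktLoop_eq (x sonuc : Int) : pvFaktLoop x sonuc = sonuc * pvF x := by
  fun_induction pvFaktLoop x sonuc with
  | case1 x s h ih =>
    rw [ih, pvF_of_gt (by omega : (0:Int) < x)]
    ring
  | case2 x s h =>
    rw [pvF_of_le (by omega : x ≤ 0)]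
    ring

-- splitting lemma: for lo - 1 ≤ m ≤ hi the product over [lo,hi] splits at m
theorem pvCarpim_split : ∀ (n : Nat) (lo m hi : Int), hi - lo ≤ (n : Int) →
    lo - 1 ≤ m → m ≤ hi → pvCarpim lo hi = pvCarpim lo m * pvCarpim (m + 1) hi := by
  intro n
  induction n with
  | zero =>
    intro lo m hi hn h1 h2
    by_cases hgt : lo > hi
    · rw [pvCarpim_of_gt hgt, pvCarpim_of_gt (by omega : lo > m),
        pvCarpim_of_gt (by omega : m + 1 > hi)]
      ring
    · have heq : lo = hi := by omega
      rcases (by omega : m = lo - 1 ∨ m = lo) with hm | hm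
      · subst hm
        rw [pvCarpim_of_gt (by omega : lo > lo - 1), show lo - 1 + 1 = lo from by ring, one_mul]
      · subst hm
        rw [pvCarpim_of_gt (by omega : m + 1 > hi), mul_one, heq]
  | succ n ih =>
    intro lo m hi hsz h1 h2
    by_cases hgt : lo > hi
    · rw [pvCarpim_of_gt hgt, pvCarpim_of_gt (by omega : lo > m),
        pvCarpim_of_gt (by omega : m + 1 > hi)]
      ring
    · by_cases heq : lo = hi
      · rcases (by omega : m = lo - 1 ∨ m = lo) with hm | hm
        · subst hm
          rw [pvCarpim_of_gt (by omega : lo > lo - 1), show lo - 1 + 1 = lo from by ring, one_mul]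
        · subst hm
          rw [pvCarpim_of_gt (by omega : m + 1 > hi), mul_one, heq]
      · rcases (by omega : m = lo - 1 ∨ m = hi ∨ (lo ≤ m ∧ m < hi)) with hm | hm | hm
        · subst hm
          rw [pvCarpim_of_gt (by omega : lo > lo - 1), show lo - 1 + 1 = lo from by ring, one_mul]
        · subst hm
          rw [pvCarpim_of_gt (by omega : m + 1 > m), mul_one]
        · have hmid := PySem.Int.floordiv_two_mid_bounds (lo := lo) (hi := hi) (by omega)
          have hltm : PySem.Int.floordiv (lo + hi) 2 < hi :=
            (PySem.Int.floordiv_lt_iff_lt_mul (by omega)).mpr (by omega)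
          have hstep := pvCarpim_of_lt (by omega : lo < hi)
          set mid := PySem.Int.floordiv (lo + hi) 2 with hmiddef
          rcases le_or_gt m mid with hle | hgt2
          · have e1 : pvCarpim lo mid = pvCarpim lo m * pvCarpim (m + 1) mid :=
              ih lo m mid (by omega) (by omega) (by omega)
            have e2 : pvCarpim (m + 1) hi = pvCarpim (m + 1) mid * pvCarpim (mid + 1) hi :=
              ih (m + 1) mid hi (by omega) (by omega) (by omega)
            rw [hstep, e1, e2]; ring
          · have e1 : pvCarpim (mid + 1) hi = pvCarpim (mid + 1) m * pvCarpim (m + 1) hi :=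
              ih (mid + 1) m hi (by omega) (by omega) (by omega)
            have e2 : pvCarpim lo m = pvCarpim lo mid * pvCarpim (mid + 1) m :=
              ih lo mid m (by omega) (by omega) (by omega)
            rw [hstep, e1, e2]; ring

theorem pvCarpim_eq_pvF_aux : ∀ (n : Nat) (x : Int), x ≤ (n : Int) → pvCarpim 1 x = pvF x := by
  intro n
  induction n with
  | zero =>
    intro x hx
    rw [pvCarpim_of_gt (by omega : (1:Int) > x), pvF_of_le (by omega : x ≤ 0)]
  | succ n ih =>
    intro x hx
    by_cases h : x ≤ 0
    · rw [pvCarpim_of_gt (by omega : (1:Int) > x), pvF_of_le h]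
    · have hs : pvCarpim 1 x = pvCarpim 1 (x - 1) * pvCarpim (x - 1 + 1) x :=
        pvCarpim_split n 1 (x - 1) x (by omega) (by omega) (by omega)
      rw [hs, show x - 1 + 1 = x from by ring, ih (x - 1) (by omega),
        pvCarpim_self x, pvF_of_gt (by omega : (0:Int) < x)]
      ring

theorem pvCarpim_eq_pvF (x : Int) : pvCarpim 1 x = pvF x := by
  by_cases h : x ≤ 0
  · rw [pvCarpim_of_gt (by omega : (1:Int) > x), pvF_of_le h]
  · exact pvCarpim_eq_pvF_aux x.toNat x (by omega)

theorem hesaplamalar_eq (sayi : Int) : hesaplamalar sayi = hesaplamalar_alt sayi := by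
  unfold hesaplamalar hesaplamalar_alt
  rw [pvFaktLoop_eq, one_mul, pvCarpim_eq_pvF]

-- ===== VERDICT (by name: the statement is the Claim_ definition above) =====
theorem hesaplamalar_spec : Claim_equal_hesaplamalar := by
  intro sayi _
  exact hesaplamalar_eq sayi
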